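-- pv_equiv track=rewrite | github.com/aitechnexus/opnai | mac_organizer/core.py | select_theme
-- ===== SOURCE A (Python) =====
-- from collections import Counter, defaultdict
-- from typing import Dict, Iterable, Iterator, List, Mapping, MutableMapping, Optional, Tuple
--
-- KEYWORD_THEMES: Mapping[str, Tuple[str, ...]] = {
--     "Finance": (
--         "invoice",
--         "receipt",
--         "tax",
--         "bank",
--         "statement",
--         "payment",
--         "budget",
--     ),
--     "Work": (
--         "meeting",
--         "project",
--         "sprint",
--         "presentation",
--         "minutes",
--         "proposal",
--         "brief",
--     ),
--     "Personal": (
--         "travel",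
--         "family",
--         "recipe",
--         "health",
--         "fitness",
--         "shopping",
--         "wishlist",
--     ),
--     "Education": (
--         "assignment",
--         "lecture",
--         "course",
--         "university",
--         "study",
--         "notes",
--     ),
--     "Legal": (
--         "contract",
--         "nda",
--         "agreement",
--         "license",
--         "policy",
--     ),
-- }
--
-- def select_theme(profile: Counter[str]) -> Optional[str]:
--     best_theme = None
--     best_score = 0
--     for theme, keywords in KEYWORD_THEMES.items():
--         score = sum(profile.get(keyword, 0) for keyword in keywords)
--         if score > best_score:
--             best_score = score
--             best_theme = theme
--     if best_score == 0:
--         return None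
--     return best_theme
-- ===== SOURCE B (Python) =====
-- from collections import Counter
-- from typing import Dict, List, Mapping, Optional, Tuple
--
-- KEYWORD_THEMES: Mapping[str, Tuple[str, ...]] = {
--     "Finance": ("invoice", "receipt", "tax", "bank", "statement", "payment", "budget"),
--     "Work": ("meeting", "project", "sprint", "presentation", "minutes", "proposal", "brief"),
--     "Personal": ("travel", "family", "recipe", "health", "fitness", "shopping", "wishlist"),
--     "Education": ("assignment", "lecture", "course", "university", "study", "notes"),
--     "Legal": ("contract", "nda", "agreement", "license", "policy"),
-- }
--
-- # inverted index: keyword -> list of themes containing it (built once at import)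
-- _KW_INDEX: Dict[str, List[str]] = {}
-- for _theme, _kws in KEYWORD_THEMES.items():
--     for _kw in _kws:
--         _KW_INDEX.setdefault(_kw, []).append(_theme)
--
--
-- def _score_profile(profile: Counter) -> Dict[str, int]:
--     scores = {theme: 0 for theme in KEYWORD_THEMES}
--     for kw, count in profile.items():
--         for theme in _KW_INDEX.get(kw, ()):
--             scores[theme] += count
--     return scores
--
--
-- def select_theme(profile: Counter) -> Optional[str]:
--     scores = _score_profile(profile)
--     best_theme = None
--     best_score = 0
--     for theme in KEYWORD_THEMES:
--         s = scores[theme]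
--         if s > best_score:
--             best_theme = theme
--             best_score = s
--     return best_theme
-- ===== Notes on version B (the rewrite author's own statement) =====
-- stated objective: alternative
-- what changed: B replaces A's per-theme rescans of the profile (one profile.get per keyword per theme) by an inverted keyword->theme index built once and a single pass over profile.items() accumulating per-theme scores, then a plain best-scan over themes.
import Mathlib
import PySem

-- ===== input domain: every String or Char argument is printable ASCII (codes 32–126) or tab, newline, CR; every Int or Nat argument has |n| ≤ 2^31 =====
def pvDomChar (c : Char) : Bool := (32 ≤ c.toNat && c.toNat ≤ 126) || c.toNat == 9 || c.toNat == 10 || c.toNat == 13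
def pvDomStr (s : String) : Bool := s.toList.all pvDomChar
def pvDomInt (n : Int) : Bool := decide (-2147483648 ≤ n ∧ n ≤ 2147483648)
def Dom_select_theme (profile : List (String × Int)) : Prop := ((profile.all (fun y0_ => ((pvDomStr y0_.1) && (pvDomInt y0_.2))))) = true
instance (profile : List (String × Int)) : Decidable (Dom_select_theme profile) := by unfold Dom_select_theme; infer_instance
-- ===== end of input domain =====

-- B builds an inverted keyword->theme index and scores all themes in one pass over the
-- profile instead of rescanning the profile once per theme (objective: alternative).
-- ===== PORT A =====
def KEYWORD_THEMES : List (String × List String) := [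
  ("Finance", ["invoice", "receipt", "tax", "bank", "statement", "payment", "budget"]),
  ("Work", ["meeting", "project", "sprint", "presentation", "minutes", "proposal", "brief"]),
  ("Personal", ["travel", "family", "recipe", "health", "fitness", "shopping", "wishlist"]),
  ("Education", ["assignment", "lecture", "course", "university", "study", "notes"]),
  ("Legal", ["contract", "nda", "agreement", "license", "policy"])]

def select_theme (profile : List (String × Int)) : Option String :=
  let r := KEYWORD_THEMES.foldl (fun (st : Option String × Int) tk =>
      let score := tk.2.foldl (fun s kw => s + (PySem.Dict.mk profile).getD kw 0) 0
      if st.2 < score then (some tk.1, score) else st) ((none : Option String), (0 : Int))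
  if r.2 = 0 then none else r.1

-- ===== PORT B =====
-- inverted index: keyword -> themes containing it (built once, as in Source B's module body)
def kwIndex : PySem.Dict String (List String) :=
  KEYWORD_THEMES.foldl (fun d tk => tk.2.foldl (fun d kw => d.modify kw [] (· ++ [tk.1])) d)
    PySem.Dict.empty

def scoreProfile (profile : List (String × Int)) : PySem.Dict String Int :=
  let scores0 := KEYWORD_THEMES.foldl (fun d tk => d.insert tk.1 (0 : Int)) PySem.Dict.empty
  profile.foldl (fun d kv => (kwIndex.getD kv.1 []).foldl (fun d t => d.modify t 0 (· + kv.2)) d)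
    scores0

def select_theme_alt (profile : List (String × Int)) : Option String :=
  let scores := scoreProfile profile
  let r := KEYWORD_THEMES.foldl (fun (st : Option String × Int) tk =>
      let s := scores.getD tk.1 0
      if st.2 < s then (some tk.1, s) else st) ((none : Option String), (0 : Int))
  r.1

-- ===== PRECONDITION & SPEC =====
-- Pre_ excludes association lists with duplicate keys: they represent no Counter/dict
-- (A's parameter type), and first-match vs summed-duplicates behaviour there is accidental.
def Pre_select_theme (profile : List (String × Int)) : Prop := (profile.map Prod.fst).Nodup
instance (profile : List (String × Int)) : Decidable (Pre_select_theme profile) := by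
  unfold Pre_select_theme; infer_instance
def pvWitness_select_theme : (List (String × Int)) := [("tax", 3), ("meeting", 1)]
def Spec_select_theme (profile : List (String × Int)) (out : Option String) : Prop := out = select_theme_alt profile
instance (profile : List (String × Int)) (out : Option String) : Decidable (Spec_select_theme profile out) := by unfold Spec_select_theme; infer_instance

-- ===== CLAIM (what is proved, stated in full; the proofs are below) =====
def Claim_equal_select_theme : Prop := ∀ (profile : List (String × Int)), Dom_select_theme profile → Pre_select_theme profile → Spec_select_theme profile (select_theme profile)

-- ===== LEMMAS AND PROOFS =====
-- literal form of the inverted index (proof helper)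
def kwIndexLit : PySem.Dict String (List String) := PySem.Dict.mk [
  ("invoice", ["Finance"]), ("receipt", ["Finance"]), ("tax", ["Finance"]), ("bank", ["Finance"]), ("statement", ["Finance"]), ("payment", ["Finance"]), ("budget", ["Finance"]),
  ("meeting", ["Work"]), ("project", ["Work"]), ("sprint", ["Work"]), ("presentation", ["Work"]), ("minutes", ["Work"]), ("proposal", ["Work"]), ("brief", ["Work"]),
  ("travel", ["Personal"]), ("family", ["Personal"]), ("recipe", ["Personal"]), ("health", ["Personal"]), ("fitness", ["Personal"]), ("shopping", ["Personal"]), ("wishlist", ["Personal"]),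
  ("assignment", ["Education"]), ("lecture", ["Education"]), ("course", ["Education"]), ("university", ["Education"]), ("study", ["Education"]), ("notes", ["Education"]),
  ("contract", ["Legal"]), ("nda", ["Legal"]), ("agreement", ["Legal"]), ("license", ["Legal"]), ("policy", ["Legal"])]

set_option maxRecDepth 10000 in
theorem kwIndex_eq : kwIndex = kwIndexLit := by decide

def sVec (d : PySem.Dict String Int) : Int × Int × Int × Int × Int :=
  (d.getD "Finance" 0, d.getD "Work" 0, d.getD "Personal" 0, d.getD "Education" 0, d.getD "Legal" 0)

def contrib (kw : String) (v : Int) : Int × Int × Int × Int × Int :=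
  ((if kw ∈ ["invoice", "receipt", "tax", "bank", "statement", "payment", "budget"] then v else 0),
   (if kw ∈ ["meeting", "project", "sprint", "presentation", "minutes", "proposal", "brief"] then v else 0),
   (if kw ∈ ["travel", "family", "recipe", "health", "fitness", "shopping", "wishlist"] then v else 0),
   (if kw ∈ ["assignment", "lecture", "course", "university", "study", "notes"] then v else 0),
   (if kw ∈ ["contract", "nda", "agreement", "license", "policy"] then v else 0))

set_option maxHeartbeats 2000000 in
theorem step_sVec (k : String) (v : Int) (d : PySem.Dict String Int) :
    sVec ((kwIndex.getD k []).foldl (fun d t => d.modify t 0 (· + v)) d) = sVec d + contrib k v := by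
  rw [kwIndex_eq]
  by_cases h1 : k = "invoice"
  · subst h1
    rw [show kwIndexLit.getD "invoice" [] = ["Finance"] from by decide]
    simp [sVec, contrib, PySem.Dict.getD_modify]
  by_cases h2 : k = "receipt"
  · subst h2
    rw [show kwIndexLit.getD "receipt" [] = ["Finance"] from by decide]
    simp [sVec, contrib, PySem.Dict.getD_modify]
  by_cases h3 : k = "tax"
  · subst h3
    rw [show kwIndexLit.getD "tax" [] = ["Finance"] from by decide]
    simp [sVec, contrib, PySem.Dict.getD_modify]
  by_cases h4 : k = "bank"
  · subst h4
    rw [show kwIndexLit.getD "bank" [] = ["Finance"] from by decide]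
    simp [sVec, contrib, PySem.Dict.getD_modify]
  by_cases h5 : k = "statement"
  · subst h5
    rw [show kwIndexLit.getD "statement" [] = ["Finance"] from by decide]
    simp [sVec, contrib, PySem.Dict.getD_modify]
  by_cases h6 : k = "payment"
  · subst h6
    rw [show kwIndexLit.getD "payment" [] = ["Finance"] from by decide]
    simp [sVec, contrib, PySem.Dict.getD_modify]
  by_cases h7 : k = "budget"
  · subst h7
    rw [show kwIndexLit.getD "budget" [] = ["Finance"] from by decide]
    simp [sVec, contrib, PySem.Dict.getD_modify]
  by_cases h8 : k = "meeting"
  · subst h8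
    rw [show kwIndexLit.getD "meeting" [] = ["Work"] from by decide]
    simp [sVec, contrib, PySem.Dict.getD_modify]
  by_cases h9 : k = "project"
  · subst h9
    rw [show kwIndexLit.getD "project" [] = ["Work"] from by decide]
    simp [sVec, contrib, PySem.Dict.getD_modify]
  by_cases h10 : k = "sprint"
  · subst h10
    rw [show kwIndexLit.getD "sprint" [] = ["Work"] from by decide]
    simp [sVec, contrib, PySem.Dict.getD_modify]
  by_cases h11 : k = "presentation"
  · subst h11
    rw [show kwIndexLit.getD "presentation" [] = ["Work"] from by decide]
    simp [sVec, contrib, PySem.Dict.getD_modify]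
  by_cases h12 : k = "minutes"
  · subst h12
    rw [show kwIndexLit.getD "minutes" [] = ["Work"] from by decide]
    simp [sVec, contrib, PySem.Dict.getD_modify]
  by_cases h13 : k = "proposal"
  · subst h13
    rw [show kwIndexLit.getD "proposal" [] = ["Work"] from by decide]
    simp [sVec, contrib, PySem.Dict.getD_modify]
  by_cases h14 : k = "brief"
  · subst h14
    rw [show kwIndexLit.getD "brief" [] = ["Work"] from by decide]
    simp [sVec, contrib, PySem.Dict.getD_modify]
  by_cases h15 : k = "travel"
  · subst h15
    rw [show kwIndexLit.getD "travel" [] = ["Personal"] from by decide]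
    simp [sVec, contrib, PySem.Dict.getD_modify]
  by_cases h16 : k = "family"
  · subst h16
    rw [show kwIndexLit.getD "family" [] = ["Personal"] from by decide]
    simp [sVec, contrib, PySem.Dict.getD_modify]
  by_cases h17 : k = "recipe"
  · subst h17
    rw [show kwIndexLit.getD "recipe" [] = ["Personal"] from by decide]
    simp [sVec, contrib, PySem.Dict.getD_modify]
  by_cases h18 : k = "health"
  · subst h18
    rw [show kwIndexLit.getD "health" [] = ["Personal"] from by decide]
    simp [sVec, contrib, PySem.Dict.getD_modify]
  by_cases h19 : k = "fitness"
  · subst h19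
    rw [show kwIndexLit.getD "fitness" [] = ["Personal"] from by decide]
    simp [sVec, contrib, PySem.Dict.getD_modify]
  by_cases h20 : k = "shopping"
  · subst h20
    rw [show kwIndexLit.getD "shopping" [] = ["Personal"] from by decide]
    simp [sVec, contrib, PySem.Dict.getD_modify]
  by_cases h21 : k = "wishlist"
  · subst h21
    rw [show kwIndexLit.getD "wishlist" [] = ["Personal"] from by decide]
    simp [sVec, contrib, PySem.Dict.getD_modify]
  by_cases h22 : k = "assignment"
  · subst h22
    rw [show kwIndexLit.getD "assignment" [] = ["Education"] from by decide]
    simp [sVec, contrib, PySem.Dict.getD_modify]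
  by_cases h23 : k = "lecture"
  · subst h23
    rw [show kwIndexLit.getD "lecture" [] = ["Education"] from by decide]
    simp [sVec, contrib, PySem.Dict.getD_modify]
  by_cases h24 : k = "course"
  · subst h24
    rw [show kwIndexLit.getD "course" [] = ["Education"] from by decide]
    simp [sVec, contrib, PySem.Dict.getD_modify]
  by_cases h25 : k = "university"
  · subst h25
    rw [show kwIndexLit.getD "university" [] = ["Education"] from by decide]
    simp [sVec, contrib, PySem.Dict.getD_modify]
  by_cases h26 : k = "study"
  · subst h26
    rw [show kwIndexLit.getD "study" [] = ["Education"] from by decide]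
    simp [sVec, contrib, PySem.Dict.getD_modify]
  by_cases h27 : k = "notes"
  · subst h27
    rw [show kwIndexLit.getD "notes" [] = ["Education"] from by decide]
    simp [sVec, contrib, PySem.Dict.getD_modify]
  by_cases h28 : k = "contract"
  · subst h28
    rw [show kwIndexLit.getD "contract" [] = ["Legal"] from by decide]
    simp [sVec, contrib, PySem.Dict.getD_modify]
  by_cases h29 : k = "nda"
  · subst h29
    rw [show kwIndexLit.getD "nda" [] = ["Legal"] from by decide]
    simp [sVec, contrib, PySem.Dict.getD_modify]
  by_cases h30 : k = "agreement"
  · subst h30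
    rw [show kwIndexLit.getD "agreement" [] = ["Legal"] from by decide]
    simp [sVec, contrib, PySem.Dict.getD_modify]
  by_cases h31 : k = "license"
  · subst h31
    rw [show kwIndexLit.getD "license" [] = ["Legal"] from by decide]
    simp [sVec, contrib, PySem.Dict.getD_modify]
  by_cases h32 : k = "policy"
  · subst h32
    rw [show kwIndexLit.getD "policy" [] = ["Legal"] from by decide]
    simp [sVec, contrib, PySem.Dict.getD_modify]
  · simp only [kwIndexLit, PySem.Dict.getD_eq_get?_getD, PySem.Dict.get?_mk_cons, beq_iff_eq]
    rw [if_neg (Ne.symm h1)]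
    rw [if_neg (Ne.symm h2)]
    rw [if_neg (Ne.symm h3)]
    rw [if_neg (Ne.symm h4)]
    rw [if_neg (Ne.symm h5)]
    rw [if_neg (Ne.symm h6)]
    rw [if_neg (Ne.symm h7)]
    rw [if_neg (Ne.symm h8)]
    rw [if_neg (Ne.symm h9)]
    rw [if_neg (Ne.symm h10)]
    rw [if_neg (Ne.symm h11)]
    rw [if_neg (Ne.symm h12)]
    rw [if_neg (Ne.symm h13)]
    rw [if_neg (Ne.symm h14)]
    rw [if_neg (Ne.symm h15)]
    rw [if_neg (Ne.symm h16)]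
    rw [if_neg (Ne.symm h17)]
    rw [if_neg (Ne.symm h18)]
    rw [if_neg (Ne.symm h19)]
    rw [if_neg (Ne.symm h20)]
    rw [if_neg (Ne.symm h21)]
    rw [if_neg (Ne.symm h22)]
    rw [if_neg (Ne.symm h23)]
    rw [if_neg (Ne.symm h24)]
    rw [if_neg (Ne.symm h25)]
    rw [if_neg (Ne.symm h26)]
    rw [if_neg (Ne.symm h27)]
    rw [if_neg (Ne.symm h28)]
    rw [if_neg (Ne.symm h29)]
    rw [if_neg (Ne.symm h30)]
    rw [if_neg (Ne.symm h31)]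
    rw [if_neg (Ne.symm h32)]
    simp [sVec, contrib, PySem.Dict.get?, h1, h2, h3, h4, h5, h6, h7, h8, h9, h10, h11, h12, h13, h14, h15, h16, h17, h18, h19, h20, h21, h22, h23, h24, h25, h26, h27, h28, h29, h30, h31, h32]

theorem fold_sVec (profile : List (String × Int)) (d : PySem.Dict String Int) :
    sVec (profile.foldl
        (fun d kv => (kwIndex.getD kv.1 []).foldl (fun d t => d.modify t 0 (· + kv.2)) d) d)
      = sVec d + (profile.map (fun kv => contrib kv.1 kv.2)).sum := by
  induction profile generalizing d with
  | nil => simp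
  | cons kv rest ih => simp [List.foldl_cons, ih, step_sVec, add_assoc]

theorem fst_sum {α β : Type} [AddMonoid α] [AddMonoid β] (l : List (α × β)) :
    l.sum.1 = (l.map Prod.fst).sum := by
  induction l with
  | nil => rfl
  | cons p t ih => simp [List.sum_cons, Prod.fst_add, ih]

theorem snd_sum {α β : Type} [AddMonoid α] [AddMonoid β] (l : List (α × β)) :
    l.sum.2 = (l.map Prod.snd).sum := by
  induction l with
  | nil => rfl
  | cons p t ih => simp [List.sum_cons, Prod.snd_add, ih]

theorem foldl_add_map {α : Type} (g : α → Int) (l : List α) (a : Int) :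
    l.foldl (fun s x => s + g x) a = a + (l.map g).sum := by
  induction l generalizing a with
  | nil => simp
  | cons x t ih => simp [List.foldl_cons, ih, add_assoc]

theorem sum_if_override (kws : List String) (k : String) (v : Int) (g : String → Int)
    (hnd : kws.Nodup) (hg : g k = 0) :
    (kws.map (fun kw => if k = kw then v else g kw)).sum
      = (if k ∈ kws then v else 0) + (kws.map g).sum := by
  induction kws with
  | nil => simp
  | cons x t ih =>
    simp only [List.nodup_cons] at hnd
    by_cases hx : k = x
    · subst hx
      have : ∀ kw ∈ t, (if k = kw then v else g kw) = g kw := by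
        intro kw hkw; rw [if_neg]; rintro rfl; exact hnd.1 hkw
      simp [List.map_cons, List.sum_cons, List.map_congr_left this, hg]
    · simp [List.map_cons, List.sum_cons, hx, ih hnd.2]
      by_cases hm : k ∈ t <;> simp [hm] <;> ring

theorem getD_mk_nil (kw : String) : (PySem.Dict.mk ([] : List (String × Int))).getD kw 0 = 0 := by
  simp [PySem.Dict.getD_eq_get?_getD, PySem.Dict.get?]

theorem lookup_sum (profile : List (String × Int)) (kws : List String)
    (hp : (profile.map Prod.fst).Nodup) (hk : kws.Nodup) :
    (kws.map (fun kw => (PySem.Dict.mk profile).getD kw 0)).sum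
      = (profile.map (fun kv => if kv.1 ∈ kws then kv.2 else 0)).sum := by
  induction profile with
  | nil => simp [getD_mk_nil]
  | cons p rest ih =>
    obtain ⟨k, v⟩ := p
    simp only [List.map_cons, List.nodup_cons] at hp
    have hg : (PySem.Dict.mk rest).getD k 0 = 0 := by
      apply PySem.Dict.getD_of_not_contains
      rw [PySem.Dict.contains_eq_decide_mem_keys]
      simpa [PySem.Dict.keys] using hp.1
    have hstep : ∀ kw, (PySem.Dict.mk ((k, v) :: rest)).getD kw 0
        = if k = kw then v else (PySem.Dict.mk rest).getD kw 0 := by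
      intro kw
      rw [PySem.Dict.getD_eq_get?_getD, PySem.Dict.get?_mk_cons]
      by_cases h : k = kw <;> simp [h, PySem.Dict.getD_eq_get?_getD]
    calc (kws.map (fun kw => (PySem.Dict.mk ((k, v) :: rest)).getD kw 0)).sum
        = (kws.map (fun kw => if k = kw then v else (PySem.Dict.mk rest).getD kw 0)).sum := by
          simp only [hstep]
      _ = (if k ∈ kws then v else 0) + (kws.map (fun kw => (PySem.Dict.mk rest).getD kw 0)).sum :=
          sum_if_override kws k v _ hk hg
      _ = _ := by simp [List.map_cons, List.sum_cons, ih hp.2]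

-- the shared best-theme selection fold
def selStep (f : String × List String → Int) :
    (Option String × Int) → (String × List String) → (Option String × Int) :=
  fun st tk => if st.2 < f tk then (some tk.1, f tk) else st

theorem foldl_sel_congr (l : List (String × List String)) (f g : String × List String → Int)
    (h : ∀ tk ∈ l, f tk = g tk) (st : Option String × Int) :
    l.foldl (selStep f) st = l.foldl (selStep g) st := by
  induction l generalizing st with
  | nil => rfl
  | cons tk rest ih =>
    simp only [List.foldl_cons]
    rw [show selStep f st tk = selStep g st tk by simp [selStep, h tk (by simp)]]
    exact ih (fun x hx => h x (by simp [hx])) _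

theorem sel_inv (f : String × List String → Int) (l : List (String × List String)) :
    ∀ st : Option String × Int, 0 ≤ st.2 → (st.2 = 0 → st.1 = none) →
      0 ≤ (l.foldl (selStep f) st).2 ∧
        ((l.foldl (selStep f) st).2 = 0 → (l.foldl (selStep f) st).1 = none) := by
  induction l with
  | nil => intro st h0 hn; exact ⟨h0, hn⟩
  | cons tk rest ih =>
    intro st h0 hn
    simp only [List.foldl_cons, selStep]
    by_cases h : st.2 < f tk
    · rw [if_pos h]
      exact ih _ (by dsimp; omega) (by dsimp; intro hz; omega)
    · rw [if_neg h]; exact ih st h0 hn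

-- ===== VERDICT (by name: the statement is the Claim_ definition above) =====
theorem select_theme_spec : Claim_equal_select_theme := by
  intro profile hdom hpre
  unfold Spec_select_theme
  have hpre' : (profile.map Prod.fst).Nodup := hpre
  -- B's five scores
  have hvec : sVec (scoreProfile profile)
      = ((0 : Int), (0 : Int), (0 : Int), (0 : Int), (0 : Int))
        + (profile.map (fun kv => contrib kv.1 kv.2)).sum := by
    rw [show sVec (scoreProfile profile)
        = sVec (profile.foldl
            (fun d kv => (kwIndex.getD kv.1 []).foldl (fun d t => d.modify t 0 (· + kv.2)) d)
            (KEYWORD_THEMES.foldl (fun d tk => d.insert tk.1 (0 : Int)) PySem.Dict.empty))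
      from rfl]
    rw [fold_sVec]
    norm_num
    rw [show sVec (KEYWORD_THEMES.foldl (fun d tk => d.insert tk.1 (0 : Int)) PySem.Dict.empty)
        = ((0 : Int), (0 : Int), (0 : Int), (0 : Int), (0 : Int)) from by decide]
  -- equality of the per-theme score functions on the theme list
  have hfg : ∀ tk ∈ KEYWORD_THEMES,
      (fun tk : String × List String =>
        tk.2.foldl (fun s kw => s + (PySem.Dict.mk profile).getD kw 0) 0) tk
      = (fun tk : String × List String => (scoreProfile profile).getD tk.1 0) tk := by
    intro tk htk
    fin_cases htk <;> dsimp only <;>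
      [ (rw [show (scoreProfile profile).getD "Finance" 0 = (sVec (scoreProfile profile)).1 from rfl]);
        (rw [show (scoreProfile profile).getD "Work" 0 = (sVec (scoreProfile profile)).2.1 from rfl]);
        (rw [show (scoreProfile profile).getD "Personal" 0 = (sVec (scoreProfile profile)).2.2.1 from rfl]);
        (rw [show (scoreProfile profile).getD "Education" 0 = (sVec (scoreProfile profile)).2.2.2.1 from rfl]);
        (rw [show (scoreProfile profile).getD "Legal" 0 = (sVec (scoreProfile profile)).2.2.2.2 from rfl])] <;>
      rw [hvec] <;>
      simp only [Prod.fst_add, Prod.snd_add, fst_sum, snd_sum, List.map_map] <;>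
      rw [foldl_add_map, zero_add, lookup_sum profile _ hpre' (by decide)] <;>
      simp [Function.comp_def, contrib]
  -- both results come from the same selection fold
  rw [show select_theme profile
      = (fun r : Option String × Int => if r.2 = 0 then none else r.1)
          (KEYWORD_THEMES.foldl (selStep (fun tk =>
            tk.2.foldl (fun s kw => s + (PySem.Dict.mk profile).getD kw 0) 0)) (none, 0))
    from rfl]
  rw [show select_theme_alt profile
      = (KEYWORD_THEMES.foldl (selStep (fun tk : String × List String =>
          (scoreProfile profile).getD tk.1 0)) (none, 0)).1
    from rfl]
  rw [foldl_sel_congr _ _ _ hfg]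
  obtain ⟨-, hz⟩ := sel_inv (fun tk : String × List String => (scoreProfile profile).getD tk.1 0)
    KEYWORD_THEMES (none, 0) (by norm_num) (fun _ => rfl)
  by_cases h : (KEYWORD_THEMES.foldl (selStep (fun tk : String × List String =>
      (scoreProfile profile).getD tk.1 0)) (none, 0)).2 = 0
  · simp only [h, if_pos]; exact (hz h).symm
  · simp only [if_neg h]
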